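-- pv_equiv track=rewrite | github.com/aaron0eidt/SpeechAnonymizer | spacy_anonymizer/training/finetune.py | clean_entity_spans
-- ===== SOURCE A (Python) =====
-- def clean_entity_spans(text, entities):
--     """Cleans entity spans by removing whitespace and invalid spans."""
--     cleaned = []
--     for start, end, label in entities:
--         if start < 0 or end > len(text) or start >= end or not label: continue
--         while start < end and text[start].isspace(): start += 1
--         while end > start and text[end - 1].isspace(): end -= 1
--         if start < end and text[start:end].strip():
--             cleaned.append((start, end, label))
--     return cleaned
-- ===== SOURCE B (Python) =====
-- def clean_entity_spans(text, entities):
--     """Cleans entity spans by removing whitespace and invalid spans."""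
--     cleaned = []
--     n = len(text)
--     for start, end, label in entities:
--         if start < 0 or end > n or start >= end or not label:
--             continue
--         sub = text[start:end]
--         stripped = sub.strip()
--         if not stripped:
--             continue
--         new_start = start + (len(sub) - len(sub.lstrip()))
--         cleaned.append((new_start, new_start + len(stripped), label))
--     return cleaned
-- ===== Notes on version B (the rewrite author's own statement) =====
-- stated objective: simpler
-- what changed: The two per-span character-walking while loops are replaced by whole-slice strip/lstrip length arithmetic: the new start is start plus the lstrip offset and the new end is start' plus the stripped length.
import Mathlib
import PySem

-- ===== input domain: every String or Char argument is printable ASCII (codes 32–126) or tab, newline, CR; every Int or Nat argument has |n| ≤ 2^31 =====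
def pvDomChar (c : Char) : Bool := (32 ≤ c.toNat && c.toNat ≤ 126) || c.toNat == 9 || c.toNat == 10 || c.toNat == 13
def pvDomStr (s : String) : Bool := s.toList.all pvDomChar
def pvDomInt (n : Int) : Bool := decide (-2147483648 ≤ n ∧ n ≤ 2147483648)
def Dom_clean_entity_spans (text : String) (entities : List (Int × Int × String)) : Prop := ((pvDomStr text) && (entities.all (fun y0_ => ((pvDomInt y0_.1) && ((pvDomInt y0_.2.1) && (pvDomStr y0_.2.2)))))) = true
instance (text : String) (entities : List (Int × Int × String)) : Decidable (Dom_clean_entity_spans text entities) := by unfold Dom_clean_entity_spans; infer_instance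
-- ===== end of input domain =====

-- B replaces A's two character-walking while loops by whole-slice strip/lstrip length arithmetic (objective: simpler).

-- ===== PORT A =====
-- while start < end and text[start].isspace(): start += 1
-- (under A's guard the index is always in range, so the `getD false` default is never used)
def pvTrimS (cs : List Char) (start stop : Int) : Int :=
  if h : start < stop ∧ ((PySem.List.pyGet? cs start).map PySem.Chars.isspace).getD false = true then
    pvTrimS cs (start + 1) stop
  else start
termination_by (stop - start).toNat
decreasing_by omega

-- while end > start and text[end - 1].isspace(): end -= 1
def pvTrimE (cs : List Char) (start stop : Int) : Int :=
  if h : start < stop ∧ ((PySem.List.pyGet? cs (stop - 1)).map PySem.Chars.isspace).getD false = true then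
    pvTrimE cs start (stop - 1)
  else stop
termination_by (stop - start).toNat
decreasing_by omega

def clean_entity_spans (text : String) (entities : List (Int × Int × String)) : List (Int × Int × String) :=
  entities.foldl (fun cleaned ent =>
    match ent with
    | (s, e, lab) =>
      if s < 0 ∨ (text.toList.length : Int) < e ∨ e ≤ s ∨ lab = "" then cleaned
      else
        let s' := pvTrimS text.toList s e
        let e' := pvTrimE text.toList s' e
        if s' < e' ∧ PySem.Chars.strip (PySem.List.slice text.toList (some s') (some e')) ≠ [] then
          cleaned ++ [(s', e', lab)]
        else cleaned) []

-- ===== PORT B =====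
def clean_entity_spans_alt (text : String) (entities : List (Int × Int × String)) : List (Int × Int × String) :=
  entities.foldl (fun cleaned ent =>
    match ent with
    | (s, e, lab) =>
      if s < 0 ∨ (text.toList.length : Int) < e ∨ e ≤ s ∨ lab = "" then cleaned
      else
        let sub := PySem.List.slice text.toList (some s) (some e)
        let stripped := PySem.Chars.strip sub
        if stripped = [] then cleaned
        else
          let ns := s + ((sub.length : Int) - ((PySem.Chars.lstrip sub).length : Int))
          cleaned ++ [(ns, ns + (stripped.length : Int), lab)]) []

-- ===== PRECONDITION & SPEC =====
def Spec_clean_entity_spans (text : String) (entities : List (Int × Int × String)) (out : List (Int × Int × String)) : Prop := out = clean_entity_spans_alt text entities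
instance (text : String) (entities : List (Int × Int × String)) (out : List (Int × Int × String)) : Decidable (Spec_clean_entity_spans text entities out) := by unfold Spec_clean_entity_spans; infer_instance

-- ===== CLAIM (what is proved, stated in full; the proofs are below) =====
def Claim_equal_clean_entity_spans : Prop := ∀ (text : String) (entities : List (Int × Int × String)), Dom_clean_entity_spans text entities → Spec_clean_entity_spans text entities (clean_entity_spans text entities)

-- ===== LEMMAS AND PROOFS =====

lemma pvDW_eq_drop (p : Char → Bool) (l : List Char) :
    List.dropWhile p l = l.drop (l.takeWhile p).length := by
  induction l with
  | nil => rfl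
  | cons a t ih => by_cases h : p a <;> simp [List.dropWhile, List.takeWhile, h, ih]

lemma pvTW_add_DW (p : Char → Bool) (l : List Char) :
    (l.takeWhile p).length + (l.dropWhile p).length = l.length := by
  rw [← List.length_append, List.takeWhile_append_dropWhile]

lemma pvSlice_nonneg (cs : List Char) (s e : Int) (h0 : 0 ≤ s) (h1 : 0 ≤ e) :
    PySem.List.slice cs (some s) (some e) = (cs.drop s.toNat).take (e.toNat - s.toNat) :=
  PySem.List.slice_toNat cs h0 h1

lemma pvSlice_len (cs : List Char) (s e : Int) (h0 : 0 ≤ s) (hse : s ≤ e) (hel : e ≤ (cs.length : Int)) :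
    ((PySem.List.slice cs (some s) (some e)).length : Int) = e - s := by
  rw [pvSlice_nonneg cs s e h0 (by omega)]
  rw [List.length_take, List.length_drop]
  omega

lemma pvSlice_empty (cs : List Char) (s e : Int) (h0 : 0 ≤ s) (h1 : 0 ≤ e) (hse : e ≤ s) :
    PySem.List.slice cs (some s) (some e) = [] := by
  rw [pvSlice_nonneg cs s e h0 h1]
  have : e.toNat - s.toNat = 0 := by omega
  simp [this]

lemma pvSlice_cons (cs : List Char) (s e : Int) (h0 : 0 ≤ s) (hse : s < e) (hel : e ≤ (cs.length : Int)) :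
    PySem.List.slice cs (some s) (some e) =
      cs[s.toNat]'(by omega) :: PySem.List.slice cs (some (s + 1)) (some e) := by
  rw [pvSlice_nonneg cs s e h0 (by omega), pvSlice_nonneg cs (s+1) e (by omega) (by omega)]
  rw [List.drop_eq_getElem_cons (by omega : s.toNat < cs.length)]
  have h2 : e.toNat - s.toNat = (e.toNat - (s+1).toNat) + 1 := by omega
  have h3 : s.toNat + 1 = (s+1).toNat := by omega
  rw [h2, List.take_succ_cons, h3]

lemma pvSlice_snoc (cs : List Char) (s e : Int) (h0 : 0 ≤ s) (hse : s < e) (hel : e ≤ (cs.length : Int)) :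
    PySem.List.slice cs (some s) (some e) =
      PySem.List.slice cs (some s) (some (e - 1)) ++ [cs[e.toNat - 1]'(by omega)] := by
  rw [pvSlice_nonneg cs s e h0 (by omega), pvSlice_nonneg cs s (e-1) h0 (by omega)]
  have hk : (e.toNat - s.toNat) = ((e-1).toNat - s.toNat) + 1 := by omega
  have hlt : (e-1).toNat - s.toNat < (cs.drop s.toNat).length := by rw [List.length_drop]; omega
  rw [hk, List.take_succ_eq_append_getElem hlt]
  congr 1
  rw [List.getElem_drop]
  simp only [List.cons.injEq, and_true]
  congr 1
  omega

-- A's start-trimming loop lands exactly past the leading whitespace of the slice.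
lemma pvTrimS_eq (cs : List Char) (n : Nat) : ∀ (s e : Int), (e - s).toNat = n → 0 ≤ s → 0 ≤ e → e ≤ (cs.length : Int) →
    pvTrimS cs s e = s + (((PySem.List.slice cs (some s) (some e)).takeWhile PySem.Chars.isspace).length : Int) := by
  induction n using Nat.strong_induction_on with
  | _ n ih =>
    intro s e hn h0 h0e hel
    rw [pvTrimS]
    by_cases hse : s < e
    · rw [PySem.List.pyGet?_eq_some_getElem cs h0 (by omega)]
      rw [pvSlice_cons cs s e h0 hse hel]
      by_cases hsp : PySem.Chars.isspace (cs[s.toNat]'(by omega)) = true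
      · rw [dif_pos (by simpa using ⟨hse, hsp⟩)]
        rw [ih (e - (s+1)).toNat (by omega) (s+1) e rfl (by omega) h0e hel]
        simp [hsp]
        omega
      · rw [dif_neg (by simp [hsp])]
        simp [hsp]
    · rw [dif_neg (by simp [hse])]
      rw [pvSlice_empty cs s e h0 h0e (by omega)]
      simp

-- A's end-trimming loop lands exactly before the trailing whitespace of the slice.
lemma pvTrimE_eq (cs : List Char) (n : Nat) : ∀ (s e : Int), (e - s).toNat = n → 0 ≤ s → 0 ≤ e → e ≤ (cs.length : Int) →
    pvTrimE cs s e = e - (((PySem.List.slice cs (some s) (some e)).reverse.takeWhile PySem.Chars.isspace).length : Int) := by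
  induction n using Nat.strong_induction_on with
  | _ n ih =>
    intro s e hn h0 h0e hel
    rw [pvTrimE]
    by_cases hse : s < e
    · have hget := PySem.List.pyGet?_eq_some_getElem cs (show (0:Int) ≤ e - 1 by omega) (show e - 1 < (cs.length : Int) by omega)
      have hcc : cs[(e - 1).toNat]'(by omega) = cs[e.toNat - 1]'(by omega) := by congr 1; omega
      rw [hcc] at hget
      rw [pvSlice_snoc cs s e h0 hse hel]
      by_cases hsp : PySem.Chars.isspace (cs[e.toNat - 1]'(by omega)) = true
      · rw [dif_pos ⟨hse, by rw [hget]; simp only [Option.map_some, Option.getD_some]; exact hsp⟩]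
        rw [ih (e - 1 - s).toNat (by omega) s (e-1) rfl h0 (by omega) (by omega)]
        simp only [List.reverse_append, List.reverse_cons, List.reverse_nil, List.nil_append,
          List.singleton_append, List.takeWhile_cons, hsp, if_true, List.length_cons]
        push_cast
        omega
      · rw [dif_neg (fun hcon => hsp (by
          have h2 := hcon.2
          rw [hget] at h2
          simpa only [Option.map_some, Option.getD_some] using h2))]
        simp only [List.reverse_append, List.reverse_cons, List.reverse_nil, List.nil_append,
          List.singleton_append, List.takeWhile_cons, hsp]
        simp
    · rw [dif_neg (by simp [hse])]
      rw [pvSlice_empty cs s e h0 h0e (by omega)]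
      simp

lemma pvHead_prefix (l1 l2 : List Char) (h : l1 <+: l2) (h1 : l1 ≠ []) : l1.head? = l2.head? := by
  obtain ⟨t, rfl⟩ := h; cases l1 <;> simp_all

-- lstrip of an already left-stripped-then-right-stripped list is itself
lemma pvLstrip_rstrip_lstrip (x : List Char) :
    PySem.Chars.lstrip (PySem.Chars.rstrip (PySem.Chars.lstrip x)) = PySem.Chars.rstrip (PySem.Chars.lstrip x) := by
  simp only [PySem.Chars.lstrip, PySem.Chars.rstrip]
  set y := List.dropWhile PySem.Chars.isspace x with hy
  set z := (List.dropWhile PySem.Chars.isspace y.reverse).reverse with hz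
  rcases hzz : z with _ | ⟨a, t⟩
  · simp
  · -- z is a prefix of y (reverse of a suffix of y.reverse), so its head is y's head, not a space
    have hpre : z <+: y := by
      rw [hz]
      have := List.dropWhile_suffix (l := y.reverse) (p := PySem.Chars.isspace)
      obtain ⟨u, hu⟩ := this
      exact ⟨u.reverse, by rw [← List.reverse_append, hu, List.reverse_reverse]⟩
    have hne : z ≠ [] := by rw [hzz]; simp
    have hh := pvHead_prefix z y hpre hne
    have hyne : y ≠ [] := by
      intro h; rw [h] at hpre; rcases hpre with ⟨u, hu⟩; simp at hu; exact hne hu.1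
    have hhead : ¬ PySem.Chars.isspace (y.head hyne) = true := by
      have := List.head_dropWhile_not PySem.Chars.isspace (l := x) (by rw [← hy]; exact hyne)
      simp [← hy] at this
      simp [this]
    have ha : a = y.head hyne := by
      rw [hzz] at hh
      simp [List.head?_eq_some_head hyne] at hh
      exact hh
    rw [List.dropWhile_cons, ha]
    simp [hhead]

-- Per-span equivalence: A's trimmed bounds and guard coincide with B's strip arithmetic.
lemma pvRstrip_rstrip (y : List Char) :
    PySem.Chars.rstrip (PySem.Chars.rstrip y) = PySem.Chars.rstrip y := by
  simp only [PySem.Chars.rstrip, List.reverse_reverse, List.dropWhile_idempotent]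

lemma pvStrip_strip (x : List Char) :
    PySem.Chars.strip (PySem.Chars.strip x) = PySem.Chars.strip x := by
  simp only [PySem.Chars.strip]
  rw [pvLstrip_rstrip_lstrip, pvRstrip_rstrip]

lemma pvSlice_shift (cs : List Char) (s e : Int) (d : Nat) (h0 : 0 ≤ s) (h0e : 0 ≤ e) :
    PySem.List.slice cs (some (s + (d : Int))) (some e) = (PySem.List.slice cs (some s) (some e)).drop d := by
  rw [pvSlice_nonneg cs s e h0 h0e, pvSlice_nonneg cs (s + (d : Int)) e (by omega) h0e,
    List.drop_take, List.drop_drop]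
  congr 1
  · omega
  · congr 1
    omega

lemma pvSlice_shrink (cs : List Char) (s e : Int) (d : Nat) (h0 : 0 ≤ s) (hsd : s ≤ e - (d : Int)) :
    PySem.List.slice cs (some s) (some (e - (d : Int))) = (PySem.List.slice cs (some s) (some e)).take ((e - s).toNat - d) := by
  rw [pvSlice_nonneg cs s e h0 (by omega), pvSlice_nonneg cs s (e - (d : Int)) h0 (by omega),
    List.take_take]
  congr 1
  omega

lemma pvSpan_eq (cs : List Char) (acc : List (Int × Int × String)) (s e : Int) (lab : String)
    (h0 : 0 ≤ s) (hse : s < e) (hel : e ≤ (cs.length : Int)) :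
    (if (pvTrimS cs s e) < (pvTrimE cs (pvTrimS cs s e) e) ∧
        PySem.Chars.strip (PySem.List.slice cs (some (pvTrimS cs s e)) (some (pvTrimE cs (pvTrimS cs s e) e))) ≠ [] then
       acc ++ [((pvTrimS cs s e), (pvTrimE cs (pvTrimS cs s e) e), lab)]
     else acc)
    =
    (if (PySem.Chars.strip (PySem.List.slice cs (some s) (some e))) = [] then acc
     else acc ++ [((s + (((PySem.List.slice cs (some s) (some e)).length : Int) - ((PySem.Chars.lstrip (PySem.List.slice cs (some s) (some e))).length : Int))), (s + (((PySem.List.slice cs (some s) (some e)).length : Int) - ((PySem.Chars.lstrip (PySem.List.slice cs (some s) (some e))).length : Int))) + ((PySem.Chars.strip (PySem.List.slice cs (some s) (some e))).length : Int), lab)]) := by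
  have h0e : (0:Int) ≤ e := by omega
  have hsublen : (((PySem.List.slice cs (some s) (some e))).length : Int) = e - s := pvSlice_len cs s e h0 (by omega) hel
  have htwdw := pvTW_add_DW PySem.Chars.isspace (PySem.List.slice cs (some s) (some e))
  have hS : (pvTrimS cs s e) = s + ((((PySem.List.slice cs (some s) (some e)).takeWhile PySem.Chars.isspace).length) : Int) := pvTrimS_eq cs (e - s).toNat s e rfl h0 h0e hel
  have hs'0 : (0:Int) ≤ (pvTrimS cs s e) := by rw [hS]; omega
  have hs'le : (pvTrimS cs s e) ≤ e := by rw [hS]; omega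
  have hlst : (PySem.Chars.lstrip (PySem.List.slice cs (some s) (some e))) = (PySem.List.slice cs (some s) (some e)).drop (((PySem.List.slice cs (some s) (some e)).takeWhile PySem.Chars.isspace).length) := by
    simp only [PySem.Chars.lstrip]
    exact pvDW_eq_drop PySem.Chars.isspace (PySem.List.slice cs (some s) (some e))
  have hlsdw : (PySem.Chars.lstrip (PySem.List.slice cs (some s) (some e))).length = (List.dropWhile PySem.Chars.isspace (PySem.List.slice cs (some s) (some e))).length := by
    simp only [PySem.Chars.lstrip]
  have hslice1 : PySem.List.slice cs (some (pvTrimS cs s e)) (some e) = (PySem.Chars.lstrip (PySem.List.slice cs (some s) (some e))) := by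
    rw [hlst, hS]
    exact pvSlice_shift cs s e (((PySem.List.slice cs (some s) (some e)).takeWhile PySem.Chars.isspace).length) h0 h0e
  have htlen : (((PySem.Chars.lstrip (PySem.List.slice cs (some s) (some e)))).length : Int) = e - (pvTrimS cs s e) := by
    rw [hlst, List.length_drop]
    omega
  have hE : (pvTrimE cs (pvTrimS cs s e) e) = e - ((((PySem.Chars.lstrip (PySem.List.slice cs (some s) (some e))).reverse.takeWhile PySem.Chars.isspace).length) : Int) := by
    rw [pvTrimE_eq cs (e - (pvTrimS cs s e)).toNat (pvTrimS cs s e) e rfl hs'0 h0e hel, hslice1]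
  have htrdw := pvTW_add_DW PySem.Chars.isspace (PySem.Chars.lstrip (PySem.List.slice cs (some s) (some e))).reverse
  have htrle : (((PySem.Chars.lstrip (PySem.List.slice cs (some s) (some e))).reverse.takeWhile PySem.Chars.isspace).length) ≤ (PySem.Chars.lstrip (PySem.List.slice cs (some s) (some e))).length := by
    rw [List.length_reverse] at htrdw
    omega
  have hstr : (PySem.Chars.strip (PySem.List.slice cs (some s) (some e))) = (PySem.Chars.lstrip (PySem.List.slice cs (some s) (some e))).take ((PySem.Chars.lstrip (PySem.List.slice cs (some s) (some e))).length - (((PySem.Chars.lstrip (PySem.List.slice cs (some s) (some e))).reverse.takeWhile PySem.Chars.isspace).length)) := by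
    simp only [PySem.Chars.strip, PySem.Chars.rstrip]
    rw [pvDW_eq_drop, List.reverse_drop, List.reverse_reverse, List.length_reverse]
  have hstlen : (((PySem.Chars.strip (PySem.List.slice cs (some s) (some e)))).length : Int) = (((PySem.Chars.lstrip (PySem.List.slice cs (some s) (some e)))).length : Int) - ((((PySem.Chars.lstrip (PySem.List.slice cs (some s) (some e))).reverse.takeWhile PySem.Chars.isspace).length) : Int) := by
    rw [hstr, List.length_take]
    omega
  have hslice2 : PySem.List.slice cs (some (pvTrimS cs s e)) (some (pvTrimE cs (pvTrimS cs s e) e)) = (PySem.Chars.strip (PySem.List.slice cs (some s) (some e))) := by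
    rw [hE, hstr, pvSlice_shrink cs (pvTrimS cs s e) e (((PySem.Chars.lstrip (PySem.List.slice cs (some s) (some e))).reverse.takeWhile PySem.Chars.isspace).length) hs'0 (by omega), hslice1]
    congr 1
    omega
  by_cases hempty : (PySem.Chars.strip (PySem.List.slice cs (some s) (some e))) = []
  · have hz : ((PySem.Chars.strip (PySem.List.slice cs (some s) (some e)))).length = 0 := by rw [hempty]; rfl
    have he' : (pvTrimE cs (pvTrimS cs s e) e) = (pvTrimS cs s e) := by
      rw [hE]
      omega
    rw [if_pos hempty, if_neg (by rw [he']; simp)]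
  · have hpos : 0 < ((PySem.Chars.strip (PySem.List.slice cs (some s) (some e)))).length := List.length_pos_iff.mpr hempty
    have hlt : (pvTrimS cs s e) < (pvTrimE cs (pvTrimS cs s e) e) := by
      rw [hE]
      omega
    rw [if_neg hempty, if_pos ⟨hlt, by rw [hslice2, pvStrip_strip]; exact hempty⟩]
    congr 1
    simp only [List.cons.injEq, and_true, Prod.mk.injEq]
    refine ⟨by omega, by rw [hE]; omega⟩

-- The two fold steps agree, hence the folds agree.
lemma pvFold_eq (text : String) (l : List (Int × Int × String)) (acc : List (Int × Int × String)) :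
    l.foldl (fun cleaned ent =>
      match ent with
      | (s, e, lab) =>
        if s < 0 ∨ (text.toList.length : Int) < e ∨ e ≤ s ∨ lab = "" then cleaned
        else
          let s' := pvTrimS text.toList s e
          let e' := pvTrimE text.toList s' e
          if s' < e' ∧ PySem.Chars.strip (PySem.List.slice text.toList (some s') (some e')) ≠ [] then
            cleaned ++ [(s', e', lab)]
          else cleaned) acc
    =
    l.foldl (fun cleaned ent =>
      match ent with
      | (s, e, lab) =>
        if s < 0 ∨ (text.toList.length : Int) < e ∨ e ≤ s ∨ lab = "" then cleaned
        else
          let sub := PySem.List.slice text.toList (some s) (some e)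
          let stripped := PySem.Chars.strip sub
          if stripped = [] then cleaned
          else
            let ns := s + ((sub.length : Int) - ((PySem.Chars.lstrip sub).length : Int))
            cleaned ++ [(ns, ns + (stripped.length : Int), lab)]) acc := by
  induction l generalizing acc with
  | nil => rfl
  | cons hd tl ih =>
    obtain ⟨s, e, lab⟩ := hd
    simp only [List.foldl_cons]
    rw [ih]
    congr 1
    by_cases hguard : s < 0 ∨ (text.toList.length : Int) < e ∨ e ≤ s ∨ lab = ""
    · rw [if_pos hguard, if_pos hguard]
    · rw [if_neg hguard, if_neg hguard]
      push Not at hguard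
      obtain ⟨h0, hel, hse, -⟩ := hguard
      exact pvSpan_eq text.toList acc s e lab (by omega) (by omega) (by omega)

-- ===== VERDICT (by name: the statement is the Claim_ definition above) =====
theorem clean_entity_spans_spec : Claim_equal_clean_entity_spans := by
  intro text entities _
  unfold Spec_clean_entity_spans clean_entity_spans clean_entity_spans_alt
  exact pvFold_eq text entities []
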